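-- pv_equiv track=rewrite | github.com/minseokpark6/Problem_Solving | 프로그래머스/0/120909. 제곱수 판별하기/제곱수 판별하기.py | solution
-- ===== SOURCE A (Python) =====
-- def solution(n):
--     li = []
--     for i in range(1, 1001):
--         squared = i ** 2
--         li.append(squared)
--     if n in li :
--         return 1
--     else:
--         return 2
-- ===== SOURCE B (Python) =====
-- def solution(n):
--     # Binary search over 1..1000 for an integer square root instead of
--     # materialising the list of all 1000 squares and scanning it.
--     if n < 1 or n > 1000 * 1000:
--         return 2
--     lo, hi = 1, 1000
--     while lo <= hi:
--         mid = (lo + hi) // 2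
--         sq = mid * mid
--         if sq == n:
--             return 1
--         if sq < n:
--             lo = mid + 1
--         else:
--             hi = mid - 1
--     return 2
-- ===== Notes on version B (the rewrite author's own statement) =====
-- stated objective: alternative
-- what changed: Replaces building the list of all 1000 squares and a linear membership scan with a range guard plus a binary search over 1..1000 for an integer square root.
import Mathlib
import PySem

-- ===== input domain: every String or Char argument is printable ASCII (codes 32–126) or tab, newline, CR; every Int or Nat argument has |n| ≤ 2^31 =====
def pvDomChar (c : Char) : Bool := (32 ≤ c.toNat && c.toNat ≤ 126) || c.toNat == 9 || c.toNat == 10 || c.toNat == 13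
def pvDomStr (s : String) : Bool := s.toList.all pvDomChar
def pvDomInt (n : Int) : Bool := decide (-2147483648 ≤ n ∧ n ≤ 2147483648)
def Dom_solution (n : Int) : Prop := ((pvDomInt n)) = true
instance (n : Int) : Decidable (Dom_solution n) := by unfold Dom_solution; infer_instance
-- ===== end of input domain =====

-- B replaces A's list of all 1000 squares + linear membership scan by a range guard
-- and a binary search over 1..1000 (objective: alternative algorithm, fewer steps per call).

-- ===== PORT A =====
def solution (n : Int) : Int :=
  let li : List Int :=
    (PySem.List.pyRange 1 1001 1).foldl (fun acc i =>
      let squared := i ^ 2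
      acc ++ [squared]) []
  if n ∈ li then 1 else 2

-- ===== PORT B =====
-- the 'while lo <= hi' loop of Source B
def solutionAltLoop (n lo hi : Int) : Int :=
  if h : lo ≤ hi then
    let mid := PySem.Int.floordiv (lo + hi) 2
    let sq := mid * mid
    if sq = n then 1
    else if sq < n then solutionAltLoop n (mid + 1) hi
    else solutionAltLoop n lo (mid - 1)
  else 2
termination_by (hi + 1 - lo).toNat
decreasing_by
  · have := PySem.Int.floordiv_two_mid_bounds h; omega
  · have := PySem.Int.floordiv_two_mid_bounds h; omega

def solution_alt (n : Int) : Int :=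
  if n < 1 ∨ n > 1000 * 1000 then 2
  else solutionAltLoop n 1 1000

-- ===== PRECONDITION & SPEC =====
def Spec_solution (n : Int) (out : Int) : Prop := out = solution_alt n
instance (n : Int) (out : Int) : Decidable (Spec_solution n out) := by unfold Spec_solution; infer_instance

-- ===== CLAIM (what is proved, stated in full; the proofs are below) =====
def Claim_equal_solution : Prop := ∀ (n : Int), Dom_solution n → Spec_solution n (solution n)

-- ===== LEMMAS AND PROOFS =====

-- the loop returns 1 exactly when some i in [lo, hi] squares to n (for 1 ≤ lo)
theorem solutionAltLoop_one : ∀ (k : Nat) (n lo hi : Int), (hi + 1 - lo).toNat = k → 1 ≤ lo →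
    (solutionAltLoop n lo hi = 1 ↔ ∃ i, lo ≤ i ∧ i ≤ hi ∧ i * i = n) := by
  intro k
  induction k using Nat.strong_induction_on with
  | _ k ih =>
    intro n lo hi hk hlo
    rw [solutionAltLoop]
    by_cases h : lo ≤ hi
    · simp only [h, dif_pos]
      obtain ⟨hm1, hm2⟩ := PySem.Int.floordiv_two_mid_bounds h
      set mid := PySem.Int.floordiv (lo + hi) 2 with hmid
      by_cases heq : mid * mid = n
      · rw [if_pos heq]
        constructor
        · intro _; exact ⟨mid, hm1, hm2, heq⟩
        · intro _; rfl
      · simp only [if_neg heq]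
        by_cases hlt : mid * mid < n
        · rw [if_pos hlt]
          rw [ih ((hi + 1 - (mid + 1)).toNat) (by omega) n (mid + 1) hi rfl (by omega)]
          constructor
          · rintro ⟨i, h1, h2, h3⟩; exact ⟨i, by omega, h2, h3⟩
          · rintro ⟨i, h1, h2, h3⟩
            refine ⟨i, ?_, h2, h3⟩
            by_contra hle
            have hi_le : i ≤ mid := by omega
            have : i * i ≤ mid * mid := by nlinarith
            omega
        · rw [if_neg hlt]
          rw [ih ((mid - 1 + 1 - lo).toNat) (by omega) n lo (mid - 1) rfl hlo]
          constructor
          · rintro ⟨i, h1, h2, h3⟩; exact ⟨i, h1, by omega, h3⟩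
          · rintro ⟨i, h1, h2, h3⟩
            refine ⟨i, h1, ?_, h3⟩
            by_contra hle
            have hi_ge : mid ≤ i := by omega
            have : mid * mid ≤ i * i := by nlinarith
            omega
    · simp only [h, dif_neg, not_false_iff]
      constructor
      · intro hc; omega
      · rintro ⟨i, h1, h2, _⟩; omega

-- the loop only returns 1 or 2
theorem solutionAltLoop_vals : ∀ (k : Nat) (n lo hi : Int), (hi + 1 - lo).toNat = k →
    solutionAltLoop n lo hi = 1 ∨ solutionAltLoop n lo hi = 2 := by
  intro k
  induction k using Nat.strong_induction_on with
  | _ k ih =>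
    intro n lo hi hk
    rw [solutionAltLoop]
    by_cases h : lo ≤ hi
    · simp only [h, dif_pos]
      obtain ⟨hm1, hm2⟩ := PySem.Int.floordiv_two_mid_bounds h
      set mid := PySem.Int.floordiv (lo + hi) 2 with hmid
      by_cases heq : mid * mid = n
      · simp [heq]
      · simp only [if_neg heq]
        by_cases hlt : mid * mid < n
        · rw [if_pos hlt]
          exact ih ((hi + 1 - (mid + 1)).toNat) (by omega) n (mid + 1) hi rfl
        · rw [if_neg hlt]
          exact ih ((mid - 1 + 1 - lo).toNat) (by omega) n lo (mid - 1) rfl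
    · simp [h]

-- A's membership test characterised
theorem mem_li_iff (n : Int) :
    (n ∈ (PySem.List.pyRange 1 1001 1).foldl (fun acc i =>
      let squared := i ^ 2
      acc ++ [squared]) []) ↔ ∃ i, 1 ≤ i ∧ i ≤ 1000 ∧ i * i = n := by
  rw [show (fun (acc : List Int) (i : Int) =>
        let squared := i ^ 2
        acc ++ [squared]) = fun acc i => acc ++ [i ^ 2] from rfl]
  rw [PySem.List.foldl_append_singleton_eq_map]
  simp only [List.nil_append, List.mem_map, PySem.List.mem_pyRange_one]
  constructor
  · rintro ⟨i, ⟨h1, h2⟩, h3⟩; exact ⟨i, h1, by omega, by rw [← h3]; ring⟩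
  · rintro ⟨i, h1, h2, h3⟩; exact ⟨i, ⟨h1, by omega⟩, by rw [← h3]; ring⟩

-- ===== VERDICT (by name: the statement is the Claim_ definition above) =====
theorem solution_spec : Claim_equal_solution := by
  intro n _
  unfold Spec_solution solution solution_alt
  simp only []
  by_cases hr : n < 1 ∨ n > 1000 * 1000
  · rw [if_pos hr]
    rw [if_neg]
    rw [mem_li_iff]
    rintro ⟨i, h1, h2, h3⟩
    have h4 : 1 ≤ i * i := by nlinarith
    have h5 : i * i ≤ 1000 * 1000 := by nlinarith
    omega
  · rw [if_neg hr]
    by_cases hm : n ∈ (PySem.List.pyRange 1 1001 1).foldl (fun acc i =>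
        let squared := i ^ 2
        acc ++ [squared]) []
    · rw [if_pos hm]
      rw [mem_li_iff] at hm
      exact ((solutionAltLoop_one _ n 1 1000 rfl (by omega)).mpr hm).symm
    · rw [if_neg hm]
      rw [mem_li_iff] at hm
      rcases solutionAltLoop_vals ((1000 + 1 - 1 : Int)).toNat n 1 1000 rfl with h | h
      · exact absurd ((solutionAltLoop_one _ n 1 1000 rfl (by omega)).mp h) hm
      · exact h.symm
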